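-- pv_equiv track=rewrite | github.com/23andMe/bonsaitree | bonsaitree/node_dict_tools.py | get_root_to_desc_degrees
-- ===== SOURCE A (Python) =====
-- from typing import Any, Dict, List, Set, Tuple
--
-- def get_root_to_desc_degrees(
--     root_id : int,
--     node_dict : Dict[int, Dict[int, int]],
--     root_deg : int = 0,
-- ) -> Dict[int,int]:
--     """
--     Get a dict with keys given by leaf ids and values given by the
--     degree from the root to the descendant id.
--
--     Args:
--         root_id: id of root of node dict
--         node_dict: existing node_dict in which root_id is placed (not
--                    necessarily as the root of the full node dict)
--     """
--     out_deg_dict = dict()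
--     out_deg_dict.update({root_id : root_deg})
--     if root_id in node_dict:
--         for node_id,deg in node_dict[root_id].items():
--             if node_id != root_id:
--                 desc_deg_dict = get_root_to_desc_degrees(node_id, node_dict, root_deg + deg)
--                 out_deg_dict.update(desc_deg_dict)
--     return out_deg_dict
-- ===== SOURCE B (Python) =====
-- def get_root_to_desc_degrees(root_id, node_dict, root_deg=0):
--     """Iterative stack-based DFS writing one shared output dict; no recursion,
--     no intermediate dicts, no merging. Children are pushed in reversed order so
--     they pop in original dict order, reproducing the recursive pre-order
--     last-writer-wins semantics on shared descendants."""
--     out = {}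
--     stack = [(root_id, root_deg)]
--     while stack:
--         node_id, acc = stack.pop()
--         out[node_id] = acc
--         for child, step in reversed(list(node_dict.get(node_id, {}).items())):
--             if child != node_id:
--                 stack.append((child, acc + step))
--     return out
-- ===== Notes on version B (the rewrite author's own statement) =====
-- stated objective: alternative
-- what changed: A is a recursive function that builds a fresh sub-dict per call and merges each one into its parent with dict.update; B is non-recursive: an explicit stack-driven DFS loop writing into one shared output dict, pushing children in reversed order so they pop in the recursion's pre-order and reproduce its last-writer-wins overwrites on shared descendants.
import Mathlib
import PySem

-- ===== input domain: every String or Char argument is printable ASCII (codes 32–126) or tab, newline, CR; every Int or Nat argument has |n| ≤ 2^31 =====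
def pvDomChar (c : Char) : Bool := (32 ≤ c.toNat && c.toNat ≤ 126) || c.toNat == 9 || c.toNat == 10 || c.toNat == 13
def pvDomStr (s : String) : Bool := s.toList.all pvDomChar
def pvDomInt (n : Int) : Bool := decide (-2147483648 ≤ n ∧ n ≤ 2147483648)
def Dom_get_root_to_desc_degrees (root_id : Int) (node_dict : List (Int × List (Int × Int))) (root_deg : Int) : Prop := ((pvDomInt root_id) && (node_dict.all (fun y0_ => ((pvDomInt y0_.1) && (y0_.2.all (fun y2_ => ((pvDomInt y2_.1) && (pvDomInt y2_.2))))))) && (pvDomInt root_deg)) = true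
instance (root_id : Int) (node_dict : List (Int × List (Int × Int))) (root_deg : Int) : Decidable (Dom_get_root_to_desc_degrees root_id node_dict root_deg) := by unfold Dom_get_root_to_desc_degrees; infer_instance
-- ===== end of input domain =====

-- B replaces A's recursive build-a-sub-dict-and-merge scheme by a non-recursive explicit-stack DFS
-- loop writing one shared output dict (objective: alternative — no recursion, no intermediate dicts).

-- ===== PORT A =====
-- A's recursion has no structural measure in Lean; 'fuel' only makes it total (depth fuel
-- node_dict.length + 1 suffices on every input admitted by Pre_, which demands acyclicity).
def pvGoA (fuel : Nat) (node_dict : List (Int × List (Int × Int))) (root_id : Int) (root_deg : Int) : PySem.Dict Int Int :=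
  match fuel with
  | 0 => PySem.Dict.empty   -- unreachable under Pre_ (Python would still be recursing)
  | f + 1 =>
    -- out_deg_dict = dict(); out_deg_dict.update({root_id : root_deg})
    let out := (PySem.Dict.empty : PySem.Dict Int Int).update [(root_id, root_deg)]
    -- if root_id in node_dict: for node_id, deg in node_dict[root_id].items(): ...
    match (PySem.Dict.mk node_dict).get? root_id with
    | none => out
    | some children =>
      children.foldl
        (fun o p =>
          if p.1 ≠ root_id then o.update (pvGoA f node_dict p.1 (root_deg + p.2)).items else o)
        out

def get_root_to_desc_degrees (root_id : Int) (node_dict : List (Int × List (Int × Int))) (root_deg : Int) : List (Int × Int) :=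
  (pvGoA (node_dict.length + 1) node_dict root_id root_deg).items

-- ===== PORT B =====
-- node_dict.get(node_id, {}).items()
def pvChildrenB (node_dict : List (Int × List (Int × Int))) (node_id : Int) : List (Int × Int) :=
  (PySem.Dict.mk node_dict).getD node_id []

-- bound on the number of entries one pop can push; only used by the termination measure
def pvMaxCL (node_dict : List (Int × List (Int × Int))) : Nat :=
  node_dict.foldr (fun p m => max p.2.length m) 0

theorem pvChildrenB_len_le (node_dict : List (Int × List (Int × Int))) (node_id : Int) :
    (pvChildrenB node_dict node_id).length ≤ pvMaxCL node_dict := by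
  simp only [pvChildrenB, pvMaxCL, PySem.Dict.getD_eq_get?_getD]
  induction node_dict with
  | nil => simp [PySem.Dict.get?]
  | cons p t ih =>
    obtain ⟨k, v⟩ := p
    rw [PySem.Dict.get?_mk_cons]
    by_cases h : k = node_id
    · simp [h]
    · simpa [h] using le_trans ih (le_max_right _ _)

-- termination measure for the stack loop: each pending entry of fuel f weighs (C+1)^f
def pvWeight (C : Nat) (stack : List (Nat × Int × Int)) : Nat :=
  (stack.map (fun e => (C + 1) ^ e.1)).sum

-- the while-stack loop of B; stack top is the list head, so Python's reversed push + pop-from-end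
-- becomes prepending the (filtered, remapped) children in their original order. The per-entry Nat
-- fuel only makes the loop total in Lean (a cycle never terminates in Python and is outside Pre_);
-- a fuel-0 entry (unreachable under Pre_) is dropped.
def pvLoopB (node_dict : List (Int × List (Int × Int))) (stack : List (Nat × Int × Int)) (out : PySem.Dict Int Int) : PySem.Dict Int Int :=
  match stack with
  | [] => out
  | (0, _, _) :: rest => pvLoopB node_dict rest out
  | (f + 1, node_id, acc) :: rest =>
      pvLoopB node_dict
        (((pvChildrenB node_dict node_id).filter (fun p => p.1 ≠ node_id)).map
            (fun p => (f, p.1, acc + p.2)) ++ rest)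
        (out.insert node_id acc)
termination_by pvWeight (pvMaxCL node_dict) stack
decreasing_by
  · simp [pvWeight]
  · have h1 : (((pvChildrenB node_dict node_id).filter (fun p => p.1 ≠ node_id)).length)
        ≤ pvMaxCL node_dict :=
      le_trans (List.length_filter_le _ _) (pvChildrenB_len_le node_dict node_id)
    have h2 : 0 < (pvMaxCL node_dict + 1) ^ f := pow_pos (Nat.succ_pos _) f
    simp only [pvWeight, List.map_append, List.sum_append, List.map_map, List.map_cons,
      List.sum_cons, Function.comp_def, pow_succ]
    have h3 : ((((pvChildrenB node_dict node_id).filter (fun p => p.1 ≠ node_id)).map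
        (fun _ => (pvMaxCL node_dict + 1) ^ f)).sum)
        = (((pvChildrenB node_dict node_id).filter (fun p => p.1 ≠ node_id)).length)
          * (pvMaxCL node_dict + 1) ^ f :=
      PySem.List.sum_map_const_nat _ _
    rw [h3]
    have := Nat.mul_le_mul_right ((pvMaxCL node_dict + 1) ^ f) h1
    nlinarith

def get_root_to_desc_degrees_alt (root_id : Int) (node_dict : List (Int × List (Int × Int))) (root_deg : Int) : List (Int × Int) :=
  (pvLoopB node_dict [(node_dict.length + 1, root_id, root_deg)] PySem.Dict.empty).items

-- ===== PRECONDITION & SPEC =====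
-- children of x that the function actually recurses into (child == x is skipped)
def pvChildKeys (node_dict : List (Int × List (Int × Int))) (x : Int) : List Int :=
  (((PySem.Dict.mk node_dict).getD x []).map Prod.fst).filter (fun c => c ≠ x)

def pvReachN (node_dict : List (Int × List (Int × Int))) : Nat → List Int → List Int
  | 0, s => s
  | n + 1, s => pvReachN node_dict n ((s ++ s.flatMap (pvChildKeys node_dict)).dedup)

-- Pre_ excludes exactly the graphs with a cycle reachable from root_id, on which Python A raises
-- RecursionError (and Python B's while loop never terminates).
def Pre_get_root_to_desc_degrees (root_id : Int) (node_dict : List (Int × List (Int × Int))) (root_deg : Int) : Prop :=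
  ∀ a ∈ pvReachN node_dict (node_dict.length + 1) [root_id],
    a ∉ pvReachN node_dict (node_dict.length + 1) (pvChildKeys node_dict a)

instance (root_id : Int) (node_dict : List (Int × List (Int × Int))) (root_deg : Int) : Decidable (Pre_get_root_to_desc_degrees root_id node_dict root_deg) := by
  unfold Pre_get_root_to_desc_degrees; infer_instance

def pvWitness_get_root_to_desc_degrees : Int × (List (Int × List (Int × Int))) × Int :=
  (0, [(0, [(1, 2), (2, 3)]), (1, [(2, 1)])], 0)

def Spec_get_root_to_desc_degrees (root_id : Int) (node_dict : List (Int × List (Int × Int))) (root_deg : Int) (out : List (Int × Int)) : Prop := out = get_root_to_desc_degrees_alt root_id node_dict root_deg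
instance (root_id : Int) (node_dict : List (Int × List (Int × Int))) (root_deg : Int) (out : List (Int × Int)) : Decidable (Spec_get_root_to_desc_degrees root_id node_dict root_deg out) := by unfold Spec_get_root_to_desc_degrees; infer_instance

-- ===== CLAIM (what is proved, stated in full; the proofs are below) =====
def Claim_equal_get_root_to_desc_degrees : Prop := ∀ (root_id : Int) (node_dict : List (Int × List (Int × Int))) (root_deg : Int), Dom_get_root_to_desc_degrees root_id node_dict root_deg → Pre_get_root_to_desc_degrees root_id node_dict root_deg → Spec_get_root_to_desc_degrees root_id node_dict root_deg (get_root_to_desc_degrees root_id node_dict root_deg)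

-- ===== LEMMAS AND PROOFS =====

-- proof-side recursive intermediary: the shared-dict pre-order visitor; pvLoopB is shown to fold
-- it over the stack, and it in turn is shown to agree with A's merge recursion pvGoA.
def pvVisitB (fuel : Nat) (node_dict : List (Int × List (Int × Int))) (node_id : Int) (deg : Int) (out : PySem.Dict Int Int) : PySem.Dict Int Int :=
  match fuel with
  | 0 => out
  | f + 1 =>
    let out := out.insert node_id deg
    ((PySem.Dict.mk node_dict).getD node_id []).foldl
      (fun o p => if p.1 ≠ node_id then pvVisitB f node_dict p.1 (deg + p.2) o else o)
      out

theorem pv_insert_comm (d : PySem.Dict Int Int) (k k2 : Int) (v v2 : Int)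
    (hc : d.contains k = true) (hne : k ≠ k2) :
    (d.insert k2 v2).insert k v = (d.insert k v).insert k2 v2 := by
  have hck : (d.insert k2 v2).contains k = true := by
    rw [PySem.Dict.contains_insert]; simp [hc]
  apply PySem.Dict.ext
  by_cases hc2 : d.contains k2 = true
  · have h1 : (d.insert k v).contains k2 = true := by
      rw [PySem.Dict.contains_insert]; simp [hc2]
    rw [PySem.Dict.items_insert_of_contains _ _ hck,
        PySem.Dict.items_insert_of_contains _ _ hc2,
        PySem.Dict.items_insert_of_contains _ _ h1,
        PySem.Dict.items_insert_of_contains _ _ hc]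
    simp only [List.map_map]
    apply List.map_congr_left
    intro p _
    simp only [Function.comp_apply]
    by_cases h : p.1 = k2 <;> by_cases h' : p.1 = k <;> simp_all [Ne.symm hne]
  · have hc2' : d.contains k2 = false := by simpa using hc2
    have h1 : (d.insert k v).contains k2 = false := by
      rw [PySem.Dict.contains_insert]; simp [hc2', Ne.symm hne]
    rw [PySem.Dict.items_insert_of_contains _ _ hck,
        PySem.Dict.items_insert_of_not_contains _ _ hc2',
        PySem.Dict.items_insert_of_not_contains _ _ h1,
        PySem.Dict.items_insert_of_contains _ _ hc]
    simp [List.map_append, hne]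
    exact Ne.symm hne

theorem pv_update_insert_of_contains (t : List (Int × Int)) (d : PySem.Dict Int Int) (k v : Int)
    (hc : d.contains k = true) (ht : ∀ p ∈ t, p.1 ≠ k) :
    (d.update t).insert k v = (d.insert k v).update t := by
  induction t generalizing d with
  | nil => rfl
  | cons p t ih =>
    have hp : p.1 ≠ k := ht p (by simp)
    have hc' : (d.insert p.1 p.2).contains k = true := by
      rw [PySem.Dict.contains_insert]; simp [hc]
    have : ∀ q ∈ t, q.1 ≠ k := fun q hq => ht q (by simp [hq])
    simp only [PySem.Dict.update, List.foldl_cons] at *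
    rw [ih _ hc' this, pv_insert_comm d k p.1 v p.2 hc (Ne.symm hp)]

theorem pv_insert_mk_head (t : List (Int × Int)) (k v v' : Int)
    (h : k ∉ t.map Prod.fst) :
    (PySem.Dict.mk ((k, v') :: t)).insert k v = PySem.Dict.mk ((k, v) :: t) := by
  have hc : (PySem.Dict.mk ((k, v') :: t)).contains k = true := by
    simp [PySem.Dict.contains_mk]
  apply PySem.Dict.ext
  rw [PySem.Dict.items_insert_of_contains _ _ hc]
  simp only [List.map_cons, if_pos (by simp : ((k, v').1 == k) = true)]
  congr 1
  conv_rhs => rw [← List.map_id t]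
  apply List.map_congr_left
  intro p hp
  have : p.1 ≠ k := fun e => h (by simpa [← e] using List.mem_map_of_mem (f := Prod.fst) hp)
  simp [this]

theorem pv_insert_mk_cons (t : List (Int × Int)) (k k' v v' : Int) (hne : k' ≠ k) :
    (PySem.Dict.mk ((k', v') :: t)).insert k v
      = PySem.Dict.mk ((k', v') :: ((PySem.Dict.mk t).insert k v).items) := by
  have hcc : (PySem.Dict.mk ((k', v') :: t)).contains k = (PySem.Dict.mk t).contains k := by
    simp [PySem.Dict.contains_mk, hne]
  apply PySem.Dict.ext
  by_cases hct : (PySem.Dict.mk t).contains k = true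
  · have h1 : (PySem.Dict.mk ((k', v') :: t)).contains k = true := by rw [hcc]; exact hct
    rw [PySem.Dict.items_insert_of_contains _ _ h1,
        PySem.Dict.items_insert_of_contains _ _ hct]
    simp [hne]
  · have hct' : (PySem.Dict.mk t).contains k = false := by
      simp only [Bool.not_eq_true] at hct; exact hct
    have h1 : (PySem.Dict.mk ((k', v') :: t)).contains k = false := by rw [hcc]; exact hct'
    rw [PySem.Dict.items_insert_of_not_contains _ _ h1,
        PySem.Dict.items_insert_of_not_contains _ _ hct']
    simp

theorem pv_update_insert (l : List (Int × Int)) (k v : Int)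
    (hnd : (l.map Prod.fst).Nodup) (d : PySem.Dict Int Int) :
    d.update ((PySem.Dict.mk l).insert k v).items = (d.update l).insert k v := by
  induction l generalizing d with
  | nil =>
    have : ((PySem.Dict.mk ([] : List (Int × Int))).insert k v).items = [(k, v)] := by
      rw [PySem.Dict.items_insert_of_not_contains _ _ (by simp [PySem.Dict.contains_mk])]
      rfl
    rw [this]; rfl
  | cons p l ih =>
    obtain ⟨k', v'⟩ := p
    simp only [List.map_cons, List.nodup_cons] at hnd
    by_cases hk : k' = k
    · subst hk
      rw [pv_insert_mk_head l k' v v' hnd.1]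
      have h1 : d.update ((k', v) :: l) = (d.insert k' v).update l := rfl
      have h2 : d.update ((k', v') :: l) = (d.insert k' v').update l := rfl
      have h3 := pv_update_insert_of_contains l (d.insert k' v') k' v
        (by rw [PySem.Dict.contains_insert]; simp)
        (fun q hq hq' => hnd.1 (hq' ▸ List.mem_map_of_mem hq))
      rw [show (PySem.Dict.mk ((k', v) :: l)).items = (k', v) :: l from rfl, h1, h2, h3,
        PySem.Dict.insert_insert_self]
    · rw [pv_insert_mk_cons l k k' v v' hk]
      have h1 : d.update ((k', v') :: ((PySem.Dict.mk l).insert k v).items)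
          = (d.insert k' v').update ((PySem.Dict.mk l).insert k v).items := rfl
      rw [show (PySem.Dict.mk ((k', v') :: ((PySem.Dict.mk l).insert k v).items)).items
            = (k', v') :: ((PySem.Dict.mk l).insert k v).items from rfl,
          h1, ih hnd.2]
      rfl

theorem pv_update_assoc (g : List (Int × Int)) (a : PySem.Dict Int Int)
    (hnd : a.keys.Nodup) (d : PySem.Dict Int Int) :
    d.update (a.update g).items = (d.update a.items).update g := by
  induction g generalizing a d with
  | nil => rfl
  | cons p g ih =>
    have h1 : a.update (p :: g) = (a.insert p.1 p.2).update g := rfl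
    have h2 : (d.update a.items).update (p :: g) = ((d.update a.items).insert p.1 p.2).update g := rfl
    obtain ⟨l⟩ := a
    rw [h1, h2, ih _ (PySem.Dict.nodup_keys_insert _ _ _ hnd) d,
      pv_update_insert l p.1 p.2 (by simpa [PySem.Dict.keys_mk] using hnd) d]

theorem pv_rebuild (l : List (Int × Int)) (hnd : (l.map Prod.fst).Nodup) :
    (PySem.Dict.empty : PySem.Dict Int Int).update l = PySem.Dict.mk l := by
  apply PySem.Dict.ext
  have := PySem.Dict.items_foldl_insert_fresh l Prod.fst Prod.snd
    (PySem.Dict.empty : PySem.Dict Int Int) (by simp [PySem.Dict.contains_empty]) hnd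
  simpa [PySem.Dict.update] using this

theorem pv_goA_nodup (fuel : Nat) (nd : List (Int × List (Int × Int))) (r dg : Int) :
    (pvGoA fuel nd r dg).keys.Nodup := by
  induction fuel generalizing r dg with
  | zero => simp [pvGoA, PySem.Dict.empty, PySem.Dict.keys_mk]
  | succ f ih =>
    have h0 : ((PySem.Dict.empty : PySem.Dict Int Int).update [(r, dg)]).keys.Nodup :=
      PySem.Dict.nodup_keys_update _ _ (by simp [PySem.Dict.empty, PySem.Dict.keys_mk])
    simp only [pvGoA]
    cases (PySem.Dict.mk nd).get? r with
    | none => exact h0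
    | some children =>
      simp only []
      have : ∀ (l : List (Int × Int)) (o : PySem.Dict Int Int), o.keys.Nodup →
          (l.foldl (fun o p => if p.1 ≠ r then o.update (pvGoA f nd p.1 (dg + p.2)).items else o) o).keys.Nodup := by
        intro l
        induction l with
        | nil => intro o h; exact h
        | cons p l ihl =>
          intro o h
          simp only [List.foldl_cons]
          by_cases hp : p.1 ≠ r
          · simp only [if_pos hp]; exact ihl _ (PySem.Dict.nodup_keys_update _ _ h)
          · simp only [if_neg hp]; exact ihl _ h
      exact this children _ h0

theorem pv_main (fuel : Nat) (nd : List (Int × List (Int × Int)))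
    (nid acc : Int) (out : PySem.Dict Int Int) :
    pvVisitB fuel nd nid acc out = out.update (pvGoA fuel nd nid acc).items := by
  induction fuel generalizing nid acc out with
  | zero => rfl
  | succ f ihf =>
    simp only [pvVisitB, pvGoA, PySem.Dict.getD]
    cases h : (PySem.Dict.mk nd).get? nid with
    | none => rfl
    | some children =>
      simp only [Option.getD_some]
      have key : ∀ (l : List (Int × Int)) (a : PySem.Dict Int Int), a.keys.Nodup →
          l.foldl (fun o p => if p.1 ≠ nid then pvVisitB f nd p.1 (acc + p.2) o else o) (out.update a.items)
          = out.update (l.foldl (fun o p => if p.1 ≠ nid then o.update (pvGoA f nd p.1 (acc + p.2)).items else o) a).items := by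
        intro l
        induction l with
        | nil => intro a _; rfl
        | cons p l ihl =>
          intro a ha
          simp only [List.foldl_cons]
          by_cases hp : p.1 ≠ nid
          · simp only [if_pos hp]
            rw [ihf p.1 (acc + p.2) (out.update a.items), ← pv_update_assoc _ _ ha]
            exact ihl _ (PySem.Dict.nodup_keys_update _ _ ha)
          · simp only [if_neg hp]
            exact ihl _ ha
      have hstart : out.insert nid acc
          = out.update ((PySem.Dict.empty : PySem.Dict Int Int).update [(nid, acc)]).items := rfl
      rw [hstart, key children _ (PySem.Dict.nodup_keys_update _ _ (by simp [PySem.Dict.empty, PySem.Dict.keys_mk]))]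

-- the if-guarded child fold of pvVisitB equals the visit-fold over the filtered, remapped
-- child entries the stack loop pushes
theorem pv_foldl_filter_map (f : Nat) (nd : List (Int × List (Int × Int))) (n d : Int)
    (l : List (Int × Int)) (out : PySem.Dict Int Int) :
    ((l.filter (fun p => p.1 ≠ n)).map (fun p => (f, p.1, d + p.2))).foldl
        (fun o e => pvVisitB e.1 nd e.2.1 e.2.2 o) out
    = l.foldl (fun o p => if p.1 ≠ n then pvVisitB f nd p.1 (d + p.2) o else o) out := by
  induction l generalizing out with
  | nil => rfl
  | cons p l ih =>
    by_cases hp : p.1 = n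
    · simpa [hp] using ih out
    · simpa [hp] using ih (pvVisitB f nd p.1 (d + p.2) out)

-- the stack loop folds the recursive visitor over the stack
theorem pv_loop_eq_foldl (nd : List (Int × List (Int × Int))) (stack : List (Nat × Int × Int))
    (out : PySem.Dict Int Int) :
    pvLoopB nd stack out = stack.foldl (fun o e => pvVisitB e.1 nd e.2.1 e.2.2 o) out := by
  fun_induction pvLoopB nd stack out with
  | case1 out => rfl
  | case2 out n d rest ih =>
    simp only [List.foldl_cons] at *
    rw [ih]
    rfl
  | case3 out f n d rest ih =>
    rw [ih, List.foldl_append, pv_foldl_filter_map]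
    rfl

-- ===== VERDICT (by name: the statement is the Claim_ definition above) =====
theorem get_root_to_desc_degrees_spec : Claim_equal_get_root_to_desc_degrees := by
  intro root_id node_dict root_deg _ _
  unfold Spec_get_root_to_desc_degrees get_root_to_desc_degrees get_root_to_desc_degrees_alt
  rw [pv_loop_eq_foldl]
  show (pvGoA (node_dict.length + 1) node_dict root_id root_deg).items
      = (pvVisitB (node_dict.length + 1) node_dict root_id root_deg PySem.Dict.empty).items
  rw [pv_main, pv_rebuild _ (by simpa using pv_goA_nodup (node_dict.length + 1) node_dict root_id root_deg)]
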